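-- pv_equiv track=rewrite | github.com/coldbeeen/cote_study | programmers/롤케이크 자르기_seulbeen.py | solution
-- ===== SOURCE A (Python) =====
-- from collections import defaultdict
--
-- def solution(topping):
--     answer = 0
--     p1 = defaultdict(int)
--     p2 = defaultdict(int)
--
--     # 동생이 모든 토핑 차지
--     for t in topping:
--         p2[t] += 1
--     # 철수가 하나씩 토핑을 뺏음
--     for t in topping:
--         p1[t] += 1
--         p2[t] -= 1
--
--         if p2[t] == 0:
--             del p2[t]
--         # 보유하고있는 토핑의 종류가 같으면 answer+=1
--         if len(p1) == len(p2):
--             answer += 1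
--     return answer
-- ===== SOURCE B (Python) =====
-- def solution(topping):
--     # suffix[k] = number of distinct toppings in topping[k:], built right-to-left
--     suffix = [0]
--     seen = set()
--     for t in reversed(topping):
--         seen.add(t)
--         suffix.append(len(seen))
--     suffix.reverse()
--     answer = 0
--     left = set()
--     for t, s in zip(topping, suffix[1:]):
--         left.add(t)
--         if len(left) == s:
--             answer += 1
--     return answer
-- ===== Notes on version B (the rewrite author's own statement) =====
-- stated objective: alternative
-- what changed: Replaces A's two incrementally updated Counter dicts (increment/decrement/delete per element) by a right-to-left pass building a suffix distinct-count table with a set, followed by one forward set scan comparing the prefix's distinct count against the table.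
import Mathlib
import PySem

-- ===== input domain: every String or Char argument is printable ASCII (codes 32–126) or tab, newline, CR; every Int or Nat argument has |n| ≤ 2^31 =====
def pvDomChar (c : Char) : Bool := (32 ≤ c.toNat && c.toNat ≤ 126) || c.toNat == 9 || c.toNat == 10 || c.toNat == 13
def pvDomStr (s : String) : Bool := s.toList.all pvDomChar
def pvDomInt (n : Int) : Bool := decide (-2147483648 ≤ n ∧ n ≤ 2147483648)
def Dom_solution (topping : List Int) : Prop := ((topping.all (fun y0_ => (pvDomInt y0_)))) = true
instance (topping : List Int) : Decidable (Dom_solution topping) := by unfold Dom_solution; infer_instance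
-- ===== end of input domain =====

-- B replaces A's two incrementally-updated Counters by a right-to-left suffix
-- distinct-count table plus one forward set scan (objective: simpler/alternative).

-- ===== PORT A =====
def solution (topping : List Int) : Int :=
  let p2 := topping.foldl (fun (d : PySem.Dict Int Int) t => d.modify t 0 (· + 1)) PySem.Dict.empty
  let st := topping.foldl (fun (s : Int × PySem.Dict Int Int × PySem.Dict Int Int) t =>
      let p1 := s.2.1.modify t 0 (· + 1)
      let p2a := s.2.2.modify t 0 (· - 1)
      let p2b := if p2a.getD t 0 == 0 then p2a.erase t else p2a
      let answer := if p1.size == p2b.size then s.1 + 1 else s.1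
      (answer, p1, p2b)) ((0 : Int), PySem.Dict.empty, p2)
  st.1

-- ===== PORT B =====
def solution_alt (topping : List Int) : Int :=
  let built := topping.reverse.foldl (fun (s : List Int × PySem.Set Int) t =>
      let seen := s.2.add t
      (s.1 ++ [PySem.Set.len seen], seen)) ([(0 : Int)], PySem.Set.empty)
  let suffix := built.1.reverse
  let st := (topping.zip (suffix.drop 1)).foldl (fun (s : Int × PySem.Set Int) p =>
      let left := s.2.add p.1
      (if PySem.Set.len left == p.2 then s.1 + 1 else s.1, left)) ((0 : Int), PySem.Set.empty)
  st.1

-- ===== PRECONDITION & SPEC =====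
def Spec_solution (topping : List Int) (out : Int) : Prop := out = solution_alt topping
instance (topping : List Int) (out : Int) : Decidable (Spec_solution topping out) := by unfold Spec_solution; infer_instance

-- ===== CLAIM (what is proved, stated in full; the proofs are below) =====
def Claim_equal_solution : Prop := ∀ (topping : List Int), Dom_solution topping → Spec_solution topping (solution topping)

-- ===== LEMMAS AND PROOFS =====

-- distinct count of a list
def dc (l : List Int) : Nat := (PySem.Set.ofList l).length

-- common specification: number of cut points where prefix and suffix have equal variety
def cuts : List Int → List Int → Int
  | _, [] => 0
  | pre, t :: r => (if dc (pre ++ [t]) = dc r then 1 else 0) + cuts (pre ++ [t]) r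

lemma set_len_congr (a b : List Int) (ha : a.Nodup) (hb : b.Nodup)
    (h : ∀ x, x ∈ a ↔ x ∈ b) : a.length = b.length :=
  ((List.perm_ext_iff_of_nodup ha hb).mpr h).length_eq

lemma size_eq_keys_length (d : PySem.Dict Int Int) : d.size = d.keys.length := by
  simp [PySem.Dict.size, PySem.Dict.keys]

lemma keys_erase (d : PySem.Dict Int Int) (k : Int) :
    (d.erase k).keys = d.keys.filter (fun x => !(x == k)) := by
  show (d.items.filter _).map _ = (d.items.map _).filter _
  induction d.items with
  | nil => rfl
  | cons h t ih =>
    cases hc : (h.1 == k) <;> simp [hc, ih]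

lemma getD_erase_self (d : PySem.Dict Int Int) (k : Int) : (d.erase k).getD k 0 = 0 := by
  have : (d.items.filter (fun p => !(p.1 == k))).find? (fun p => p.1 == k) = none := by
    rw [List.find?_eq_none]
    intro p hp
    have := (List.mem_filter.mp hp).2
    simp at this; simp [this]
  simp [PySem.Dict.getD, PySem.Dict.get?, PySem.Dict.erase, this]

lemma getD_erase_of_ne (d : PySem.Dict Int Int) (k k' : Int) (h : k' ≠ k) :
    (d.erase k).getD k' 0 = d.getD k' 0 := by
  have : (d.items.filter (fun p => !(p.1 == k))).find? (fun p => p.1 == k')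
       = d.items.find? (fun p => p.1 == k') := by
    induction d.items with
    | nil => rfl
    | cons hd tl ih =>
      by_cases hk : hd.1 = k
      · have h1 : (k == k') = false := by simp; exact fun e => h e.symm
        simp [hk, List.find?, h1, ih]
      · cases h2 : (hd.1 == k') <;>
          simp [hk, List.find?, h2, ih]
  simp [PySem.Dict.getD, PySem.Dict.get?, PySem.Dict.erase, this]

-- ---- A side ----

lemma counter_snoc (pre : List Int) (t : Int) :
    PySem.Dict.counter (pre ++ [t]) = (PySem.Dict.counter pre).modify t 0 (· + 1) := by
  rw [PySem.Dict.counter_eq_foldl, PySem.Dict.counter_eq_foldl, List.foldl_append]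
  rfl

lemma A_loop : ∀ (rest pre : List Int) (ans : Int) (p2 : PySem.Dict Int Int),
    p2.keys.Nodup → (∀ k, k ∈ p2.keys ↔ k ∈ rest) → (∀ k, p2.getD k 0 = (rest.count k : Int)) →
    (rest.foldl (fun (s : Int × PySem.Dict Int Int × PySem.Dict Int Int) t =>
      let p1 := s.2.1.modify t 0 (· + 1)
      let p2a := s.2.2.modify t 0 (· - 1)
      let p2b := if p2a.getD t 0 == 0 then p2a.erase t else p2a
      let answer := if p1.size == p2b.size then s.1 + 1 else s.1
      (answer, p1, p2b)) (ans, PySem.Dict.counter pre, p2)).1 = ans + cuts pre rest := by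
  intro rest
  induction rest with
  | nil => intro pre ans p2 _ _ _; simp [cuts]
  | cons t r ih =>
    intro pre ans p2 hnd hmem hcnt
    have hct : p2.contains t = true :=
      (PySem.Dict.contains_iff_mem_keys p2 t).mpr ((hmem t).mpr (List.mem_cons_self))
    have hkeys2a : (p2.modify t 0 (· - 1)).keys = p2.keys := by
      rw [PySem.Dict.keys_modify, PySem.Dict.keys_insert_of_contains _ _ hct]
    have hgta : (p2.modify t 0 (· - 1)).getD t 0 = (r.count t : Int) := by
      rw [PySem.Dict.getD_modify]
      simp only [hcnt t, List.count_cons_self]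
      push_cast; ring
    have hp1k : (PySem.Dict.counter (pre ++ [t])).size = dc (pre ++ [t]) := by
      rw [size_eq_keys_length, PySem.Dict.keys_counter]; rfl
    simp only [List.foldl_cons, ← counter_snoc]
    by_cases hm : t ∈ r
    · -- t still occurs in the suffix: no deletion
      have hc0 : (((p2.modify t 0 (· - 1)).getD t 0) == (0 : Int)) = false := by
        rw [hgta]
        simp [List.count_eq_zero]
        exact hm
      rw [hc0]
      simp only [Bool.false_eq_true, if_false]
      have hnd' : (p2.modify t 0 (· - 1)).keys.Nodup := by rw [hkeys2a]; exact hnd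
      have hmem' : ∀ k, k ∈ (p2.modify t 0 (· - 1)).keys ↔ k ∈ r := by
        intro k
        rw [hkeys2a, hmem k, List.mem_cons]
        constructor
        · rintro (rfl | h) <;> [exact hm; exact h]
        · exact Or.inr
      have hcnt' : ∀ k, (p2.modify t 0 (· - 1)).getD k 0 = (r.count k : Int) := by
        intro k
        by_cases hk : k = t
        · subst hk; exact hgta
        · rw [PySem.Dict.getD_modify, if_neg hk, hcnt k, List.count_cons_of_ne (Ne.symm hk)]
      have hsz : (p2.modify t 0 (· - 1)).size = dc r := by
        rw [size_eq_keys_length]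
        exact set_len_congr _ _ hnd' (PySem.Set.nodup_ofList r)
          (fun x => by rw [hmem' x, PySem.Set.mem_ofList])
      rw [ih (pre ++ [t]) _ _ hnd' hmem' hcnt']
      simp only [hp1k, hsz, cuts, beq_iff_eq]
      split <;> ring
    · -- t exhausted: the entry is deleted
      have hc0 : (((p2.modify t 0 (· - 1)).getD t 0) == (0 : Int)) = true := by
        rw [hgta]
        simp [List.count_eq_zero]
        exact hm
      rw [hc0]
      simp only [if_true]
      set p2b := (p2.modify t 0 (· - 1)).erase t with hp2b
      have hkb : p2b.keys = p2.keys.filter (fun x => !(x == t)) := by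
        rw [hp2b, keys_erase, hkeys2a]
      have hnd' : p2b.keys.Nodup := by rw [hkb]; exact hnd.filter _
      have hmem' : ∀ k, k ∈ p2b.keys ↔ k ∈ r := by
        intro k
        rw [hkb, List.mem_filter]
        simp only [Bool.not_eq_eq_eq_not, Bool.not_true, beq_eq_false_iff_ne, ne_eq]
        rw [hmem k, List.mem_cons]
        constructor
        · rintro ⟨rfl | h, hne⟩ <;> [exact absurd rfl hne; exact h]
        · intro h; exact ⟨Or.inr h, fun e => hm (e ▸ h)⟩
      have hcnt' : ∀ k, p2b.getD k 0 = (r.count k : Int) := by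
        intro k
        by_cases hk : k = t
        · subst hk
          rw [hp2b, getD_erase_self, List.count_eq_zero.mpr hm]
          rfl
        · rw [hp2b, getD_erase_of_ne _ _ _ hk, PySem.Dict.getD_modify, if_neg hk,
            hcnt k, List.count_cons_of_ne (Ne.symm hk)]
      have hsz : p2b.size = dc r := by
        rw [size_eq_keys_length]
        exact set_len_congr _ _ hnd' (PySem.Set.nodup_ofList r)
          (fun x => by rw [hmem' x, PySem.Set.mem_ofList])
      rw [ih (pre ++ [t]) _ _ hnd' hmem' hcnt']
      simp only [hp1k, hsz, cuts, beq_iff_eq]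
      split <;> ring

-- ---- B side ----

def sizesL : List Int → PySem.Set Int → List Int
  | [], _ => []
  | t :: r, S => PySem.Set.len (S.add t) :: sizesL r (S.add t)

lemma build_acc : ∀ (l acc : List Int) (S : PySem.Set Int),
    (l.foldl (fun (s : List Int × PySem.Set Int) t =>
      let seen := s.2.add t
      (s.1 ++ [PySem.Set.len seen], seen)) (acc, S))
    = (acc ++ sizesL l S, l.foldl PySem.Set.add S) := by
  intro l
  induction l with
  | nil => intro acc S; simp [sizesL]
  | cons t r ih =>
    intro acc S
    simp only [List.foldl_cons, sizesL, ih]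
    simp

lemma sizesL_append : ∀ (a b : List Int) (S : PySem.Set Int),
    sizesL (a ++ b) S = sizesL a S ++ sizesL b (a.foldl PySem.Set.add S) := by
  intro a
  induction a with
  | nil => intro b S; simp [sizesL]
  | cons t r ih => intro b S; simp [sizesL, ih]

def mapDrop : List Int → List Int
  | [] => []
  | t :: r => (dc (t :: r) : Int) :: mapDrop r

lemma sizes_rev : ∀ l : List Int, (sizesL l.reverse PySem.Set.empty).reverse = mapDrop l := by
  intro l
  induction l with
  | nil => rfl
  | cons x l' ih =>
    have h1 : (x :: l').reverse = l'.reverse ++ [x] := by simp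
    rw [h1, sizesL_append]
    have h2 : l'.reverse.foldl PySem.Set.add PySem.Set.empty = PySem.Set.ofList l'.reverse :=
      (PySem.Set.ofList_eq_foldl l'.reverse).symm
    have h3 : ((PySem.Set.ofList l'.reverse).add x).length = dc (x :: l') := by
      apply set_len_congr
      · exact PySem.Set.nodup_add _ x (PySem.Set.nodup_ofList _)
      · exact PySem.Set.nodup_ofList _
      · intro y
        simp [PySem.Set.mem_add, PySem.Set.mem_ofList]
        tauto
    rw [h2]
    show (sizesL l'.reverse PySem.Set.empty ++ [PySem.Set.len ((PySem.Set.ofList l'.reverse).add x)]).reverse = _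
    rw [List.reverse_append]
    simp only [PySem.Set.len, h3, List.reverse_singleton, List.singleton_append, ih]
    rfl

lemma B_loop : ∀ (rest pre : List Int) (ans : Int),
    ((rest.zip (mapDrop rest.tail ++ [0])).foldl (fun (s : Int × PySem.Set Int) p =>
      let left := s.2.add p.1
      (if PySem.Set.len left == p.2 then s.1 + 1 else s.1, left)) (ans, PySem.Set.ofList pre)).1
    = ans + cuts pre rest := by
  intro rest
  induction rest with
  | nil => intro pre ans; simp [cuts]
  | cons t r ih =>
    intro pre ans
    cases r with
    | nil =>
      show (if PySem.Set.len ((PySem.Set.ofList pre).add t) == (0 : Int) then ans + 1 else ans)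
          = ans + cuts pre [t]
      rw [← PySem.Set.ofList_append_singleton]
      simp only [cuts, PySem.Set.len, dc, beq_iff_eq, Nat.cast_eq_zero,
        PySem.Set.ofList_nil, List.length_nil]
      split <;> ring
    | cons t' r' =>
      simp only [List.tail_cons, mapDrop, List.cons_append, List.zip_cons_cons, List.foldl_cons]
      rw [← PySem.Set.ofList_append_singleton]
      have h := ih (pre ++ [t])
        (if PySem.Set.len (PySem.Set.ofList (pre ++ [t])) == ((dc (t' :: r') : Nat) : Int)
         then ans + 1 else ans)
      simp only [List.tail_cons] at h
      rw [h]
      have hc : (PySem.Set.len (PySem.Set.ofList (pre ++ [t])) == ((dc (t' :: r') : Nat) : Int))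
          = decide (dc (pre ++ [t]) = dc (t' :: r')) := by
        rw [Bool.eq_iff_iff]
        simp [PySem.Set.len, dc]
      rw [hc]
      simp only [cuts]
      by_cases hd : dc (pre ++ [t]) = dc (t' :: r')
      · simp [hd]
        ring
      · simp [hd]

-- ---- main ----

lemma A_main (l : List Int) : solution l = cuts [] l := by
  have h := A_loop l [] 0 (PySem.Dict.counter l)
    (PySem.Dict.nodup_keys_counter l)
    (fun k => by rw [PySem.Dict.keys_counter, PySem.Set.mem_ofList])
    (fun k => PySem.Dict.getD_counter l k)
  simp only [solution, ← PySem.Dict.counter_eq_foldl]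
  have he : (PySem.Dict.empty : PySem.Dict Int Int) = PySem.Dict.counter [] := rfl
  rw [he, h, zero_add]

lemma B_main (l : List Int) : solution_alt l = cuts [] l := by
  simp only [solution_alt, build_acc, List.reverse_append, List.reverse_cons,
    List.reverse_nil, List.nil_append, sizes_rev]
  cases l with
  | nil => rfl
  | cons t r =>
    have h := B_loop (t :: r) [] 0
    simp only [List.tail_cons] at h
    have he : PySem.Set.ofList ([] : List Int) = PySem.Set.empty := rfl
    rw [he] at h
    simp only [mapDrop, List.cons_append, List.drop_succ_cons, List.drop_zero, h, zero_add]

-- ===== VERDICT (by name: the statement is the Claim_ definition above) =====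
theorem solution_spec : Claim_equal_solution := by
  intro l _
  show solution l = solution_alt l
  rw [A_main, B_main]
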